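-- pv_equiv track=rewrite | github.com/Reistoge/Scripts | PYTHON/universidad/progra/Cosas_prueba2/untitled1.py | max_triple
-- ===== SOURCE A (Python) =====
-- def max_triple(lista):
--
--     mayor1=0
--     mayor2=0
--     mayor3=0
--     for i in range(0,len(lista),1):
--         if lista[i]>mayor1:
--             mayor1=lista[i]
--
--
--     for i in range(0,len(lista),1):
--         if lista[i]>mayor2 and lista[i]!=mayor1:
--             mayor2=lista[i]
--
--
--     for i in range(0,len(lista),1):
--         if lista[i]>mayor3 and lista[i] not in[mayor1, mayor2]:
--             mayor3=lista[i]
--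
--     return[mayor1,mayor2,mayor3]
-- ===== SOURCE B (Python) =====
-- def max_triple(lista):
--     vals = sorted({x for x in lista if x > 0}, reverse=True)
--     vals += [0, 0, 0]
--     return vals[:3]
-- ===== Notes on version B (the rewrite author's own statement) =====
-- stated objective: simpler
-- what changed: Replaces A's three full exclusionary scans (each re-reading the list and excluding the previously found maxima) with one build of the set of distinct positive values, a descending sort, and taking the first three padded with zeros.
import Mathlib
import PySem

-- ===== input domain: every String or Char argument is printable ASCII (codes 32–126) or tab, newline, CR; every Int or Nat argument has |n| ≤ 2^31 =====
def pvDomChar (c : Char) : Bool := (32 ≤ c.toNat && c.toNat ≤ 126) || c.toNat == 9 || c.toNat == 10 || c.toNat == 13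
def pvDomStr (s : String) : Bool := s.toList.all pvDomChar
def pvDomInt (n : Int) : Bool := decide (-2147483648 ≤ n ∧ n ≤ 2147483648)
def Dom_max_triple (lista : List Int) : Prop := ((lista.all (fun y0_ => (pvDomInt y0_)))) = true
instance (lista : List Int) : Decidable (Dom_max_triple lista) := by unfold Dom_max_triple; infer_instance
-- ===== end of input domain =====

-- B is simpler: one set-of-distinct-positives + descending sort + take-3-with-zero-padding replaces A's three exclusionary scans.

-- ===== PORT A =====
def max_triple (lista : List Int) : List Int :=
  let mayor1 := (PySem.List.pyRange 0 lista.length 1).foldl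
    (fun m i => if PySem.List.pyGetD lista i 0 > m then PySem.List.pyGetD lista i 0 else m) 0
  let mayor2 := (PySem.List.pyRange 0 lista.length 1).foldl
    (fun m i => if PySem.List.pyGetD lista i 0 > m ∧ PySem.List.pyGetD lista i 0 ≠ mayor1
                then PySem.List.pyGetD lista i 0 else m) 0
  let mayor3 := (PySem.List.pyRange 0 lista.length 1).foldl
    (fun m i => if PySem.List.pyGetD lista i 0 > m ∧ PySem.List.pyGetD lista i 0 ∉ [mayor1, mayor2]
                then PySem.List.pyGetD lista i 0 else m) 0
  [mayor1, mayor2, mayor3]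

-- ===== PORT B =====
def max_triple_alt (lista : List Int) : List Int :=
  let vals := PySem.List.sorted (PySem.Set.ofList (lista.filter (fun x => decide (x > 0)))) (fun x => x) true
  (vals ++ [0, 0, 0]).take 3

-- ===== PRECONDITION & SPEC =====
def Spec_max_triple (lista : List Int) (out : List Int) : Prop := out = max_triple_alt lista
instance (lista : List Int) (out : List Int) : Decidable (Spec_max_triple lista out) := by unfold Spec_max_triple; infer_instance

-- ===== CLAIM (what is proved, stated in full; the proofs are below) =====
def Claim_equal_max_triple : Prop := ∀ (lista : List Int), Dom_max_triple lista → Spec_max_triple lista (max_triple lista)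

-- ===== LEMMAS AND PROOFS =====

lemma loop_eq_filter_max (l : List Int) (P : Int → Prop) [DecidablePred P] :
    l.foldl (fun m x => if x > m ∧ P x then x else m) 0
      = (l.filter (fun x => decide (P x))).foldl max 0 := by
  rw [List.foldl_filter]
  refine PySem.List.foldl_congr_mem _ _ _ _ (fun acc x _ => ?_)
  by_cases h : P x <;> split_ifs <;> simp_all
  omega

lemma loop1_conv (l : List Int) :
    (PySem.List.pyRange 0 l.length 1).foldl
      (fun m i => if PySem.List.pyGetD l i 0 > m then PySem.List.pyGetD l i 0 else m) 0
    = (l.filter (fun _ => true)).foldl max 0 := by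
  rw [PySem.List.foldl_pyRange_zero_pyGetD' l 0 (fun (m x : Int) => if x > m then x else m) 0,
      List.filter_true]
  refine PySem.List.foldl_congr_mem _ _ _ _ (fun acc x _ => ?_)
  split_ifs <;> omega

lemma loop23_conv (l : List Int) (P : Int → Prop) [DecidablePred P] :
    (PySem.List.pyRange 0 l.length 1).foldl
      (fun m i => if PySem.List.pyGetD l i 0 > m ∧ P (PySem.List.pyGetD l i 0)
                  then PySem.List.pyGetD l i 0 else m) 0
    = (l.filter (fun x => decide (P x))).foldl max 0 := by
  rw [PySem.List.foldl_pyRange_zero_pyGetD' l 0 (fun (m x : Int) => if x > m ∧ P x then x else m) 0]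
  exact loop_eq_filter_max l P

lemma filter_max_eq (l : List Int) (P : Int → Bool) (a : Int)
    (ha : a ∈ l) (hpos : 0 < a) (hPa : P a = true)
    (hub : ∀ x ∈ l, P x = true → x ≤ a) :
    (l.filter P).foldl max 0 = a := by
  have haf : a ∈ l.filter P := List.mem_filter.2 ⟨ha, hPa⟩
  have h1 := (PySem.List.le_foldl_max (l.filter P) 0).2 a haf
  rcases PySem.List.foldl_max_mem (l.filter P) 0 with h2 | h2
  · omega
  · have h3 := List.mem_filter.1 h2
    have := hub _ h3.1 h3.2
    omega

lemma filter_max_zero (l : List Int) (P : Int → Bool)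
    (h : ∀ x ∈ l, P x = true → x ≤ 0) :
    (l.filter P).foldl max 0 = 0 := by
  have h1 := (PySem.List.le_foldl_max (l.filter P) 0).1
  rcases PySem.List.foldl_max_mem (l.filter P) 0 with h2 | h2
  · omega
  · have h3 := List.mem_filter.1 h2
    have := h _ h3.1 h3.2
    omega

lemma main_eq (l : List Int) : max_triple l = max_triple_alt l := by
  obtain ⟨S, hs⟩ : ∃ S, PySem.List.sorted (PySem.Set.ofList (l.filter (fun x => decide (x > 0))))
      (fun x => x) true = S := ⟨_, rfl⟩
  have hmem : ∀ x, x ∈ S ↔ x ∈ l ∧ 0 < x := by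
    intro x
    rw [← hs, PySem.List.mem_sorted, PySem.Set.mem_ofList]
    simp
  have hpw : S.Pairwise (fun p q : Int => q ≤ p) := by
    rw [← hs]; exact PySem.List.sorted_pairwise_rev _ _
  have hnd : S.Nodup := by
    rw [← hs]
    exact (PySem.List.sorted_perm _ _ _).symm.nodup (PySem.Set.nodup_ofList _)
  simp only [max_triple, max_triple_alt, hs, loop1_conv]
  rcases S with _ | ⟨a, t⟩
  · -- no positive element
    have hle : ∀ x ∈ l, x ≤ 0 := by
      intro x hx
      by_contra h
      exact absurd ((hmem x).2 ⟨hx, by omega⟩) (List.not_mem_nil)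
    rw [filter_max_zero l _ (fun x hx _ => hle x hx)]
    rw [loop23_conv l (fun x => x ≠ (0:Int))]
    rw [filter_max_zero l _ (fun x hx _ => hle x hx)]
    rw [loop23_conv l (fun x => x ∉ ([0, 0] : List Int))]
    rw [filter_max_zero l _ (fun x hx _ => hle x hx)]
    simp
  · have ha := (hmem a).1 List.mem_cons_self
    have hta : ∀ y ∈ t, y ≤ a := (List.pairwise_cons.1 hpw).1
    have hub1 : ∀ x ∈ l, x ≤ a := by
      intro x hx
      by_cases hp : 0 < x
      · rcases List.mem_cons.1 ((hmem x).2 ⟨hx, hp⟩) with h | h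
        · omega
        · exact hta x h
      · omega
    rw [filter_max_eq l _ a ha.1 ha.2 rfl (fun x hx _ => hub1 x hx)]
    rw [loop23_conv l (fun x => x ≠ a)]
    rcases t with _ | ⟨b, u⟩
    · -- a is the only positive value
      have hz : ∀ x ∈ l, x ≠ a → x ≤ 0 := by
        intro x hx hxa
        by_contra h
        rcases List.mem_cons.1 ((hmem x).2 ⟨hx, by omega⟩) with h' | h'
        · exact hxa h'
        · exact absurd h' List.not_mem_nil
      rw [filter_max_zero l _ (fun x hx hP => hz x hx (by simpa using hP))]
      rw [loop23_conv l (fun x => x ∉ ([a, 0] : List Int))]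
      rw [filter_max_zero l _ (fun x hx hP => hz x hx (by simp at hP; exact hP.1))]
      simp
    · have hb := (hmem b).1 (List.mem_cons_of_mem _ List.mem_cons_self)
      have hba : b ≠ a := by
        intro h; exact (List.nodup_cons.1 hnd).1 (h ▸ List.mem_cons_self)
      have hub : ∀ y ∈ u, y ≤ b := (List.pairwise_cons.1 (List.pairwise_cons.1 hpw).2).1
      have hub2 : ∀ x ∈ l, x ≠ a → x ≤ b := by
        intro x hx hxa
        by_cases hp : 0 < x
        · rcases List.mem_cons.1 ((hmem x).2 ⟨hx, hp⟩) with h | h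
          · exact absurd h hxa
          · rcases List.mem_cons.1 h with h | h
            · omega
            · exact hub x h
        · omega
      rw [filter_max_eq l _ b hb.1 hb.2 (by simp [hba]) (fun x hx hP => hub2 x hx (by simpa using hP))]
      rw [loop23_conv l (fun x => x ∉ ([a, b] : List Int))]
      rcases u with _ | ⟨c, v⟩
      · have hz : ∀ x ∈ l, x ∉ [a, b] → x ≤ 0 := by
          intro x hx hxm
          by_contra h
          have := (hmem x).2 ⟨hx, by omega⟩
          simp at this hxm
          rcases this with h' | h' <;> simp [h'] at hxm
        rw [filter_max_zero l _ (fun x hx hP => hz x hx (by simpa using hP))]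
        simp
      · have hc := (hmem c).1 (by simp)
        have hca : c ≠ a := by
          intro h
          exact (List.nodup_cons.1 hnd).1 (h ▸ (by simp : c ∈ b :: c :: v))
        have hcb : c ≠ b := by
          intro h
          exact (List.nodup_cons.1 (List.nodup_cons.1 hnd).2).1 (h ▸ (by simp : c ∈ c :: v))
        have hvc : ∀ y ∈ v, y ≤ c :=
          (List.pairwise_cons.1 (List.pairwise_cons.1 (List.pairwise_cons.1 hpw).2).2).1
        have hub3 : ∀ x ∈ l, x ∉ [a, b] → x ≤ c := by
          intro x hx hxm
          simp at hxm
          by_cases hp : 0 < x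
          · rcases List.mem_cons.1 ((hmem x).2 ⟨hx, hp⟩) with h | h
            · exact absurd h hxm.1
            · rcases List.mem_cons.1 h with h | h
              · exact absurd h hxm.2
              · rcases List.mem_cons.1 h with h | h
                · omega
                · exact hvc x h
          · omega
        rw [filter_max_eq l _ c hc.1 hc.2 (by simp [hca, hcb]) (fun x hx hP => hub3 x hx (by simpa using hP))]
        simp

-- ===== VERDICT (by name: the statement is the Claim_ definition above) =====
theorem max_triple_spec : Claim_equal_max_triple := by
  intro lista _
  unfold Spec_max_triple
  exact main_eq lista
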